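-- pv_equiv track=rewrite | github.com/Spitfire-Products/Arkival-V4 | codebase_summary/update_project_summary.py | _detect_ai_capabilities
-- ===== SOURCE A (Python) =====
-- from typing import Dict, Any, List
--
-- def _detect_ai_capabilities(ai_files: List[str], providers: List[str]) -> List[str]:
--     """Detect AI capabilities from files and providers"""
--     capabilities = []
--
--     capability_patterns = {
--         "Text Generation": ["generate", "completion", "text", "chat"],
--         "Embeddings": ["embed", "vector", "similarity"],
--         "Classification": ["classify", "sentiment", "categorize"],
--         "Translation": ["translate", "language"],
--         "Speech": ["speech", "audio", "voice"],
--         "Vision": ["vision", "image", "ocr"],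
--         "Code Generation": ["code", "copilot", "assist"]
--     }
--
--     for capability, patterns in capability_patterns.items():
--         for file in ai_files:
--             if any(pattern in file.lower() for pattern in patterns):
--                 if capability not in capabilities:
--                     capabilities.append(capability)
--
--     # Default capability if none detected but AI files exist
--     if not capabilities and ai_files:
--         capabilities = ["Text Generation"]
--
--     return capabilities
-- ===== SOURCE B (Python) =====
-- from typing import List
--
-- _CAPS = ["Text Generation", "Embeddings", "Classification", "Translation",
--          "Speech", "Vision", "Code Generation"]
--
-- _PATTERNS = [
--     ("generate", 0), ("completion", 0), ("text", 0), ("chat", 0),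
--     ("embed", 1), ("vector", 1), ("similarity", 1),
--     ("classify", 2), ("sentiment", 2), ("categorize", 2),
--     ("translate", 3), ("language", 3),
--     ("speech", 4), ("audio", 4), ("voice", 4),
--     ("vision", 5), ("image", 5), ("ocr", 5),
--     ("code", 6), ("copilot", 6), ("assist", 6),
-- ]
--
-- def _detect_ai_capabilities(ai_files: List[str], providers: List[str]) -> List[str]:
--     """Bitmask detection over a flat (pattern, capability-bit) table, with early exit
--     once all seven capability bits are set."""
--     mask = 0
--     for file in ai_files:
--         fl = file.lower()
--         for pat, bit in _PATTERNS:
--             mask |= (pat in fl) << bit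
--         if mask == 0b1111111:
--             break
--     result = [_CAPS[i] for i in range(7) if (mask >> i) & 1]
--     if not result and ai_files:
--         return ["Text Generation"]
--     return result
-- ===== Notes on version B (the rewrite author's own statement) =====
-- stated objective: faster
-- what changed: B replaces A's capability-outer loops with list-membership dedup by a bitmask: one pass over files (lowercasing each file once instead of once per capability) ORs capability bits via a flat (pattern, bit) table, breaks early once all 7 bits are set, then decodes the mask in canonical order.
import Mathlib
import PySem

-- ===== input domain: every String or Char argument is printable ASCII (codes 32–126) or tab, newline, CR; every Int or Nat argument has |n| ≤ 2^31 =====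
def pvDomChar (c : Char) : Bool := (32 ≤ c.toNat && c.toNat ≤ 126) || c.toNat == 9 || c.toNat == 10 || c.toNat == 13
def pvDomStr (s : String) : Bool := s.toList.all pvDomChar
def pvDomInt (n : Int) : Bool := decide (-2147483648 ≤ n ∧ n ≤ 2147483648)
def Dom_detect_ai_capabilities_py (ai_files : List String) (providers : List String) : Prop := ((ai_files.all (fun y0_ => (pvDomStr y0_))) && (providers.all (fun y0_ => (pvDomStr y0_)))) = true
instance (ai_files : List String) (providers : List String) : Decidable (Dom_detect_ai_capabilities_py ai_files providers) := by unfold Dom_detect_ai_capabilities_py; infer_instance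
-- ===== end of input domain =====

-- B replaces A's capability-outer rescan-and-dedup loops by one bitmask pass over the files
-- (flat pattern table, each file lowercased once, early exit when all bits set); measured faster.

-- ===== PORT A =====
-- the capability_patterns dict literal (insertion order)
def pvCapabilityPatterns : List (String × List String) :=
  [("Text Generation", ["generate", "completion", "text", "chat"]),
   ("Embeddings", ["embed", "vector", "similarity"]),
   ("Classification", ["classify", "sentiment", "categorize"]),
   ("Translation", ["translate", "language"]),
   ("Speech", ["speech", "audio", "voice"]),
   ("Vision", ["vision", "image", "ocr"]),
   ("Code Generation", ["code", "copilot", "assist"])]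

def detect_ai_capabilities_py (ai_files : List String) (providers : List String) : List String :=
  let capabilities :=
    pvCapabilityPatterns.foldl (fun caps cp =>
      ai_files.foldl (fun caps file =>
        if cp.2.any (fun pattern => PySem.Str.isIn pattern (PySem.Str.lower file)) then
          (if caps.contains cp.1 then caps else caps ++ [cp.1])
        else caps) caps) []
  if capabilities.isEmpty && !ai_files.isEmpty then ["Text Generation"] else capabilities

-- ===== PORT B =====
-- Source B's _CAPS and flat _PATTERNS tables
def pvCaps : List String :=
  ["Text Generation", "Embeddings", "Classification", "Translation", "Speech", "Vision", "Code Generation"]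

def pvPatterns : List (String × Nat) :=
  [("generate", 0), ("completion", 0), ("text", 0), ("chat", 0),
   ("embed", 1), ("vector", 1), ("similarity", 1),
   ("classify", 2), ("sentiment", 2), ("categorize", 2),
   ("translate", 3), ("language", 3),
   ("speech", 4), ("audio", 4), ("voice", 4),
   ("vision", 5), ("image", 5), ("ocr", 5),
   ("code", 6), ("copilot", 6), ("assist", 6)]

-- one file's inner pattern loop: mask |= (pat in fl) << bit
def pvStep (m : Nat) (file : String) : Nat :=
  let fl := PySem.Str.lower file
  pvPatterns.foldl (fun m pb => m ||| (if PySem.Str.isIn pb.1 fl then 1 <<< pb.2 else 0)) m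

-- the file loop with the early 'break' when mask == 0b1111111
def pvLoop : List String → Nat → Nat
  | [], m => m
  | f :: fs, m =>
    let m' := pvStep m f
    if m' == 127 then m' else pvLoop fs m'

def detect_ai_capabilities_py_alt (ai_files : List String) (providers : List String) : List String :=
  let mask := pvLoop ai_files 0
  -- [_CAPS[i] for i in range(7) if (mask >> i) & 1]; i < 7 so _CAPS[i] never raises
  let result := (List.range 7).filterMap (fun i =>
    if (mask >>> i) &&& 1 == 1 then some (pvCaps.getD i "") else none)
  if result.isEmpty && !ai_files.isEmpty then ["Text Generation"] else result

-- ===== PRECONDITION & SPEC =====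
def Spec_detect_ai_capabilities_py (ai_files : List String) (providers : List String) (out : List String) : Prop := out = detect_ai_capabilities_py_alt ai_files providers
instance (ai_files : List String) (providers : List String) (out : List String) : Decidable (Spec_detect_ai_capabilities_py ai_files providers out) := by unfold Spec_detect_ai_capabilities_py; infer_instance

-- ===== CLAIM (what is proved, stated in full; the proofs are below) =====
def Claim_equal_detect_ai_capabilities_py : Prop := ∀ (ai_files : List String) (providers : List String), Dom_detect_ai_capabilities_py ai_files providers → Spec_detect_ai_capabilities_py ai_files providers (detect_ai_capabilities_py ai_files providers)

-- ===== LEMMAS AND PROOFS =====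

-- "some pattern of cp occurs in file.lower()"
def pvMatch (file : String) (cp : String × List String) : Bool :=
  cp.2.any (fun p => PySem.Str.isIn p (PySem.Str.lower file))

-- "some file matches capability cp"
def pvDet (fs : List String) (cp : String × List String) : Bool :=
  fs.any (fun f => pvMatch f cp)

-- A's inner file loop: appends cp.1 exactly when some file matches and cp.1 is new
lemma pvA_inner (cap : String) (pats : List String) (files : List String) (acc : List String) :
    files.foldl (fun caps file =>
        if pats.any (fun pattern => PySem.Str.isIn pattern (PySem.Str.lower file)) then
          (if caps.contains cap then caps else caps ++ [cap])
        else caps) acc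
    = if pvDet files (cap, pats) && !(acc.contains cap) then acc ++ [cap] else acc := by
  induction files generalizing acc with
  | nil => simp [pvDet]
  | cons f fs ih =>
    simp only [List.foldl_cons]
    have hdet : pvDet (f :: fs) (cap, pats)
        = ((pats.any fun pattern => PySem.Str.isIn pattern (PySem.Str.lower f)) || pvDet fs (cap, pats)) := by
      simp [pvDet, pvMatch, List.any_cons]
    by_cases hm : (pats.any fun pattern => PySem.Str.isIn pattern (PySem.Str.lower f)) = true
    · rw [if_pos hm]
      by_cases hc : acc.contains cap = true
      · have hc' : cap ∈ acc := by simpa using hc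
        rw [if_pos hc, ih, hdet, hm]
        simp [hc']
      · have hc' : cap ∉ acc := by simpa using hc
        rw [if_neg hc, ih, hdet, hm]
        simp [hc']
    · simp only [Bool.not_eq_true] at hm
      rw [if_neg (by rw [hm]; simp), ih, hdet, hm]
      simp

-- A's outer capability loop: produces acc ++ keys of the matched table entries in order
lemma pvA_outer (fs : List String) (table : List (String × List String)) (acc : List String)
    (hnd : (table.map Prod.fst).Nodup) (hacc : ∀ cp ∈ table, acc.contains cp.1 = false) :
    table.foldl (fun caps cp =>
        fs.foldl (fun caps file =>
          if cp.2.any (fun pattern => PySem.Str.isIn pattern (PySem.Str.lower file)) then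
            (if caps.contains cp.1 then caps else caps ++ [cp.1])
          else caps) caps) acc
    = acc ++ (table.filter (pvDet fs)).map Prod.fst := by
  induction table generalizing acc with
  | nil => simp
  | cons cp rest ih =>
    simp only [List.foldl_cons, List.filter_cons]
    rw [pvA_inner cp.1 cp.2 fs acc]
    have hcp : acc.contains cp.1 = false := hacc cp (by simp)
    by_cases hd : pvDet fs cp
    · have : pvDet fs (cp.1, cp.2) = true := by simpa using hd
      rw [if_pos (by simp [this]; simpa using hcp)]
      rw [ih (acc ++ [cp.1]) (by simpa using hnd.of_cons) ?_]
      · simp [hd]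
      · intro cq hq
        have h1 := hacc cq (by simp [hq])
        have h2 : cq.1 ≠ cp.1 := by
          intro he
          rw [List.map_cons] at hnd
          exact (List.nodup_cons.mp hnd).1 (he ▸ List.mem_map_of_mem (f := Prod.fst) hq)
        have h1' : cq.1 ∉ acc := by simpa using h1
        simp [h1', h2]
    · have : pvDet fs (cp.1, cp.2) = false := by simpa using hd
      rw [if_neg (by simp [this])]
      rw [ih acc (by simpa using hnd.of_cons) (fun cq hq => hacc cq (by simp [hq]))]
      simp [hd]

-- bit i of the inner pattern-fold: old bit OR some pattern with that bit matches
lemma pvFold_testBit (l : List (String × Nat)) (fl : String) (m i : Nat) :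
    Nat.testBit (l.foldl (fun m pb => m ||| (if PySem.Str.isIn pb.1 fl then 1 <<< pb.2 else 0)) m) i
    = (Nat.testBit m i || l.any (fun pb => pb.2 == i && PySem.Str.isIn pb.1 fl)) := by
  induction l generalizing m with
  | nil => simp
  | cons pb l ih =>
    simp only [List.foldl_cons, List.any_cons]
    rw [ih]
    have hpow : Nat.testBit (1 <<< pb.2) i = (pb.2 == i) := by
      rw [Nat.one_shiftLeft, Nat.testBit_two_pow]
      by_cases h : pb.2 = i <;> simp [h]
    by_cases hc : PySem.Str.isIn pb.1 fl = true
    · rw [if_pos hc, Nat.testBit_or, hpow, hc, Bool.and_true, Bool.or_assoc]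
    · rw [if_neg hc]
      have hc' : PySem.Str.isIn pb.1 fl = false := by simpa using hc
      rw [hc', Bool.and_false, Bool.false_or]
      simp
  
lemma pvStep_testBit (m : Nat) (f : String) (i : Nat) :
    Nat.testBit (pvStep m f) i
    = (Nat.testBit m i || pvPatterns.any (fun pb => pb.2 == i && PySem.Str.isIn pb.1 (PySem.Str.lower f))) := by
  unfold pvStep
  exact pvFold_testBit _ _ _ _

-- no pattern carries a bit ≥ 7
lemma pvPatterns_bits : ∀ pb ∈ pvPatterns, pb.2 < 7 := by decide

lemma pvAny_high (fl : String) (i : Nat) (hi : 7 ≤ i) :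
    pvPatterns.any (fun pb => pb.2 == i && PySem.Str.isIn pb.1 fl) = false := by
  rw [List.any_eq_false]
  intro pb hpb
  have := pvPatterns_bits pb hpb
  simp only [Bool.and_eq_true, beq_iff_eq, not_and]
  intro h
  omega

-- a full mask is a fixed point of pvStep
lemma pvStep_full (f : String) : pvStep 127 f = 127 := by
  apply Nat.eq_of_testBit_eq
  intro i
  rw [pvStep_testBit]
  by_cases hi : i < 7
  · have h127 : Nat.testBit 127 i = true := by
      interval_cases i <;> decide
    simp [h127]
  · have h127 : Nat.testBit 127 i = false := by
      have : 127 < 2 ^ i := by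
        calc (127 : Nat) < 2 ^ 7 := by norm_num
        _ ≤ 2 ^ i := Nat.pow_le_pow_right (by norm_num) (by omega)
      exact Nat.testBit_lt_two_pow this
    rw [h127, pvAny_high _ i (by omega)]
    rfl

lemma pvFoldStep_full (fs : List String) : fs.foldl pvStep 127 = 127 := by
  induction fs with
  | nil => rfl
  | cons f fs ih => simp [pvStep_full, ih]

-- the break-carrying loop equals the plain fold
lemma pvLoop_eq (fs : List String) (m : Nat) : pvLoop fs m = fs.foldl pvStep m := by
  induction fs generalizing m with
  | nil => rfl
  | cons f fs ih =>
    simp only [pvLoop, List.foldl_cons]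
    by_cases h : pvStep m f == 127
    · rw [if_pos h]
      have h' : pvStep m f = 127 := by simpa using h
      rw [h', pvFoldStep_full]
    · rw [if_neg h, ih]

-- bit i of the final mask: some file sets it
lemma pvMask_testBit (fs : List String) (m i : Nat) :
    Nat.testBit (fs.foldl pvStep m) i
    = (Nat.testBit m i || fs.any (fun f => pvPatterns.any (fun pb => pb.2 == i && PySem.Str.isIn pb.1 (PySem.Str.lower f)))) := by
  induction fs generalizing m with
  | nil => simp
  | cons f fs ih =>
    simp only [List.foldl_cons, List.any_cons]
    rw [ih, pvStep_testBit, Bool.or_assoc]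

-- for each capability bit, the flat-table test agrees with that capability's pattern list
lemma pvBitMatch (f : String) (i : Nat) (hi : i < 7) :
    pvPatterns.any (fun pb => pb.2 == i && PySem.Str.isIn pb.1 (PySem.Str.lower f))
    = pvMatch f (pvCapabilityPatterns.getD i ("", [])) := by
  interval_cases i <;>
    simp [pvPatterns, pvCapabilityPatterns, pvMatch]

-- bit i of the final mask = pvDet of capability i
lemma pvMaskBit_det (fs : List String) (i : Nat) (hi : i < 7) :
    Nat.testBit (fs.foldl pvStep 0) i = pvDet fs (pvCapabilityPatterns.getD i ("", [])) := by
  rw [pvMask_testBit]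
  simp only [Nat.zero_testBit, Bool.false_or, pvDet]
  rw [show (fun f => pvPatterns.any (fun pb => pb.2 == i && PySem.Str.isIn pb.1 (PySem.Str.lower f)))
      = (fun f => pvMatch f (pvCapabilityPatterns.getD i ("", []))) from
    funext (fun f => pvBitMatch f i hi)]

-- the python bit test is Nat.testBit
lemma pvBitTest (m i : Nat) : ((m >>> i) &&& 1 == 1) = Nat.testBit m i := by
  simp [Nat.testBit]

-- B's result list equals A's filtered capability keys
set_option maxHeartbeats 800000 in
lemma pvResult_eq (fs : List String) :
    (List.range 7).filterMap (fun i =>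
        if (fs.foldl pvStep 0 >>> i) &&& 1 == 1 then some (pvCaps.getD i "") else none)
    = (pvCapabilityPatterns.filter (pvDet fs)).map Prod.fst := by
  have hb : ∀ i, i < 7 → ((fs.foldl pvStep 0 >>> i) &&& 1 == 1)
      = pvDet fs (pvCapabilityPatterns.getD i ("", [])) := fun i hi => by
    rw [pvBitTest, pvMaskBit_det fs i hi]
  have h0 := hb 0 (by norm_num); have h1 := hb 1 (by norm_num)
  have h2 := hb 2 (by norm_num); have h3 := hb 3 (by norm_num)
  have h4 := hb 4 (by norm_num); have h5 := hb 5 (by norm_num)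
  have h6 := hb 6 (by norm_num)
  simp only [pvCapabilityPatterns] at h0 h1 h2 h3 h4 h5 h6 ⊢
  simp only [List.getD_cons_zero, List.getD_cons_succ] at h0 h1 h2 h3 h4 h5 h6
  simp only [show List.range 7 = [0,1,2,3,4,5,6] from rfl, List.filterMap_cons,
    List.filterMap_nil, List.filter_cons, List.filter_nil]
  rw [h0, h1, h2, h3, h4, h5, h6]
  generalize pvDet fs ("Text Generation", ["generate", "completion", "text", "chat"]) = b0
  generalize pvDet fs ("Embeddings", ["embed", "vector", "similarity"]) = b1
  generalize pvDet fs ("Classification", ["classify", "sentiment", "categorize"]) = b2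
  generalize pvDet fs ("Translation", ["translate", "language"]) = b3
  generalize pvDet fs ("Speech", ["speech", "audio", "voice"]) = b4
  generalize pvDet fs ("Vision", ["vision", "image", "ocr"]) = b5
  generalize pvDet fs ("Code Generation", ["code", "copilot", "assist"]) = b6
  cases b0 <;> cases b1 <;> cases b2 <;> cases b3 <;> cases b4 <;> cases b5 <;> cases b6 <;> rfl

-- ===== VERDICT (by name: the statement is the Claim_ definition above) =====
theorem detect_ai_capabilities_py_spec : Claim_equal_detect_ai_capabilities_py := by
  intro ai_files providers _
  unfold Spec_detect_ai_capabilities_py detect_ai_capabilities_py detect_ai_capabilities_py_alt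
  simp only []
  rw [pvLoop_eq, pvResult_eq,
    pvA_outer ai_files pvCapabilityPatterns [] (by decide) (by intro cp _; simp)]
  simp
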